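-- pv_equiv track=rewrite | github.com/ndwiga6769/code-practice | The latest clock.py | latest_clock
-- ===== SOURCE A (Python) =====
-- from itertools import permutations
--
-- def latest_clock(a, b, c, d):
--     digits = [a, b, c, d]
--     all_times = permutations(digits)
--
--     latest_valid_time = "00:00"
--
--     for time in all_times:
--         hh = time[0] * 10 + time[1]
--         mm = time[2] * 10 + time[3]
--
--         if 0 <= hh < 24 and 0 <= mm < 60:
--             current_time = f"{hh:02d}:{mm:02d}"
--
--             if current_time > latest_valid_time:
--                 latest_valid_time = current_time
--
--     return latest_valid_time
-- ===== SOURCE B (Python) =====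
-- def latest_clock(a, b, c, d):
--     # Scan the output space of times from latest (23:59) to earliest (00:00);
--     # return the first time whose hour and minute can be built from the four
--     # values: some ordered pair makes the hour and the remaining pair, in one
--     # of its two orders, makes the minute.  "00:00" if no time is formable.
--     digits = [a, b, c, d]
--
--     def formable(hh, mm):
--         for i in range(4):
--             for j in range(4):
--                 if i == j or digits[i] * 10 + digits[j] != hh:
--                     continue
--                 k, l = [x for x in range(4) if x != i and x != j]
--                 if digits[k] * 10 + digits[l] == mm or digits[l] * 10 + digits[k] == mm:
--                     return True
--         return False
--
--     for t in range(1439, -1, -1):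
--         hh, mm = t // 60, t % 60
--         if formable(hh, mm):
--             return f"{hh:02d}:{mm:02d}"
--     return "00:00"
-- ===== Notes on version B (the rewrite author's own statement) =====
-- stated objective: alternative
-- what changed: A permutes the four input digits (24 permutations), validates each as HH:MM and keeps the lexicographically largest formatted string; B never permutes the input: it scans the output space of times from 23:59 down to 00:00 and returns at the first time whose hour and minute are formable from the four values (an ordered pair equals the hour, the remaining pair in one of its two orders equals the minute), defaulting to "00:00".
import Mathlib
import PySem

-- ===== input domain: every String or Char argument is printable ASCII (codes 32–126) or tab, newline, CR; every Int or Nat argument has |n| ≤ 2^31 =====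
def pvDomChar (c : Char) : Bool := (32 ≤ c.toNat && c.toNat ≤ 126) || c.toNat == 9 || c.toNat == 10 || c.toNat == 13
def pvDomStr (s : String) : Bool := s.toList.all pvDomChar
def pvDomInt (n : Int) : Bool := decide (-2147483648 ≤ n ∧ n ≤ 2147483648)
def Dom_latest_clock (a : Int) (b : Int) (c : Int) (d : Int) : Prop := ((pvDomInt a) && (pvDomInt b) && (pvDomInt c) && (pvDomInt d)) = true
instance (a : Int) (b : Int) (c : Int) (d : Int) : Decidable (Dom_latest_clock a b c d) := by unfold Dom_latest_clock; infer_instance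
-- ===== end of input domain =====

-- B replaces A's permutation enumeration of the input digits by a countdown over the output
-- space of times (23:59 .. 00:00), returning at the first formable time (objective:
-- alternative algorithm, same cost).

-- f"{n:02d}" for n ≥ 0 (both programs only format values ≥ 0): str(n) left-padded with '0' to width 2
def fmt02 (n : Int) : String := PySem.Str.zfill (PySem.Int.toStr n) 2

-- ===== PORT A =====
def latest_clock (a : Int) (b : Int) (c : Int) (d : Int) : String :=
  let digits : List Int := [a, b, c, d]
  let all_times := PySem.List.permutations digits digits.length
  all_times.foldl (fun latest_valid_time time =>
      -- time is a length-4 reordering of digits, so the indices 0..3 are in range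
      let hh := PySem.List.pyGetD time 0 0 * 10 + PySem.List.pyGetD time 1 0
      let mm := PySem.List.pyGetD time 2 0 * 10 + PySem.List.pyGetD time 3 0
      if 0 ≤ hh ∧ hh < 24 ∧ 0 ≤ mm ∧ mm < 60 then
        let current_time := fmt02 hh ++ ":" ++ fmt02 mm
        if latest_valid_time < current_time then current_time else latest_valid_time
      else latest_valid_time)
    "00:00"

-- ===== PORT B =====
-- B's nested helper 'formable(hh, mm)' (closes over digits = [a, b, c, d]); Python's
-- short-circuit 'i == j or … != hh: continue' is the two nested early-false tests
def formable (a : Int) (b : Int) (c : Int) (d : Int) (hh : Int) (mm : Int) : Bool :=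
  let digits : List Int := [a, b, c, d]
  (PySem.List.pyRange 0 4).any (fun i =>
    (PySem.List.pyRange 0 4).any (fun j =>
      if i = j then false
      else if PySem.List.pyGetD digits i 0 * 10 + PySem.List.pyGetD digits j 0 ≠ hh then false
      else
        -- 'k, l = [x for x in range(4) if x != i and x != j]': exactly two indices remain
        let rem := (PySem.List.pyRange 0 4).filter (fun x => decide (x ≠ i) && decide (x ≠ j))
        let k := PySem.List.pyGetD rem 0 0
        let l := PySem.List.pyGetD rem 1 0
        decide (PySem.List.pyGetD digits k 0 * 10 + PySem.List.pyGetD digits l 0 = mm) ||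
        decide (PySem.List.pyGetD digits l 0 * 10 + PySem.List.pyGetD digits k 0 = mm)))

-- B's main loop 'for t in range(1439, -1, -1): … return …' with its early return
def scanB (F : Int → Int → Bool) : List Int → String
  | [] => "00:00"
  | t :: ts =>
    let hh := PySem.Int.floordiv t 60
    let mm := PySem.Int.mod t 60
    if F hh mm then fmt02 hh ++ ":" ++ fmt02 mm else scanB F ts

def latest_clock_alt (a : Int) (b : Int) (c : Int) (d : Int) : String :=
  scanB (formable a b c d) (PySem.List.pyRange 1439 (-1) (-1))

-- ===== PRECONDITION & SPEC =====
def Spec_latest_clock (a : Int) (b : Int) (c : Int) (d : Int) (out : String) : Prop := out = latest_clock_alt a b c d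
instance (a : Int) (b : Int) (c : Int) (d : Int) (out : String) : Decidable (Spec_latest_clock a b c d out) := by unfold Spec_latest_clock; infer_instance

-- ===== CLAIM (what is proved, stated in full; the proofs are below) =====
def Claim_equal_latest_clock : Prop := ∀ (a : Int) (b : Int) (c : Int) (d : Int), Dom_latest_clock a b c d → Spec_latest_clock a b c d (latest_clock a b c d)

-- ===== LEMMAS AND PROOFS =====

-- "HH:MM" for a minute count x
def fmtB (x : Int) : String := fmt02 (PySem.Int.floordiv x 60) ++ ":" ++ fmt02 (PySem.Int.mod x 60)

-- A's loop body on one (hh, mm) candidate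
def stepS (s : String) (p : Int × Int) : String :=
  if 0 ≤ p.1 ∧ p.1 < 24 ∧ 0 ≤ p.2 ∧ p.2 < 60 then
    let current_time := fmt02 p.1 ++ ":" ++ fmt02 p.2
    if s < current_time then current_time else s
  else s

-- the same candidate on the integer side
def stepI (x : Int) (p : Int × Int) : Int :=
  if 0 ≤ p.1 ∧ p.1 < 24 ∧ 0 ≤ p.2 ∧ p.2 < 60 then max x (p.1 * 60 + p.2) else x

-- the 12 ordered hour pairs with their two minute candidates, in A's permutation order
def trips (a b c d : Int) : List (Int × Int × Int) :=
  [(a*10+b, c*10+d, d*10+c), (a*10+c, b*10+d, d*10+b), (a*10+d, b*10+c, c*10+b),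
   (b*10+a, c*10+d, d*10+c), (b*10+c, a*10+d, d*10+a), (b*10+d, a*10+c, c*10+a),
   (c*10+a, b*10+d, d*10+b), (c*10+b, a*10+d, d*10+a), (c*10+d, a*10+b, b*10+a),
   (d*10+a, b*10+c, c*10+b), (d*10+b, a*10+c, c*10+a), (d*10+c, a*10+b, b*10+a)]

def flatT (ts : List (Int × Int × Int)) : List (Int × Int) :=
  ts.flatMap (fun t => [(t.1, t.2.1), (t.1, t.2.2)])

theorem perms4 (a b c d : Int) : PySem.List.permutations [a,b,c,d] 4 =
  [[a,b,c,d],[a,b,d,c],[a,c,b,d],[a,c,d,b],[a,d,b,c],[a,d,c,b],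
   [b,a,c,d],[b,a,d,c],[b,c,a,d],[b,c,d,a],[b,d,a,c],[b,d,c,a],
   [c,a,b,d],[c,a,d,b],[c,b,a,d],[c,b,d,a],[c,d,a,b],[c,d,b,a],
   [d,a,b,c],[d,a,c,b],[d,b,a,c],[d,b,c,a],[d,c,a,b],[d,c,b,a]] := by
  simp [PySem.List.permutations, List.range_succ, List.eraseIdx]

theorem A_eq (a b c d : Int) :
    latest_clock a b c d = List.foldl stepS "00:00" (flatT (trips a b c d)) := by
  have h1 : latest_clock a b c d =
      List.foldl (fun s time =>
          stepS s (PySem.List.pyGetD time 0 0 * 10 + PySem.List.pyGetD time 1 0,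
                   PySem.List.pyGetD time 2 0 * 10 + PySem.List.pyGetD time 3 0))
        "00:00" (PySem.List.permutations [a, b, c, d] 4) := rfl
  rw [h1, perms4, ← List.foldl_map]
  exact congrArg (List.foldl stepS "00:00") (by rfl)

-- B's formability test, rewritten over the 12 candidate triples (concrete index arithmetic)
set_option maxHeartbeats 1000000 in
theorem formable_eq (a b c d hh mm : Int) :
    formable a b c d hh mm = (trips a b c d).any (fun tr =>
      if tr.1 ≠ hh then false else (decide (tr.2.1 = mm) || decide (tr.2.2 = mm))) := by
  have hr : PySem.List.pyRange 0 4 = [0,1,2,3] := by decide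
  simp only [formable, hr, trips, List.any_cons, List.any_nil, List.filter_cons, List.filter_nil]
  norm_num [PySem.List.pyGetD, PySem.List.pyIdx?]
  simp only [show Int.toNat 2 = 2 from rfl, show Int.toNat 3 = 3 from rfl,
    List.getElem_cons_succ, List.getElem_cons_zero, Bool.or_assoc]

-- B's formability test answers exactly "is (hh, mm) one of the 12×2 candidates?"
theorem formable_iff (a b c d hh mm : Int) :
    formable a b c d hh mm = true ↔
      ∃ tr ∈ trips a b c d, tr.1 = hh ∧ (tr.2.1 = mm ∨ tr.2.2 = mm) := by
  rw [formable_eq]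
  rw [List.any_eq_true]
  constructor
  · rintro ⟨tr, htr, hb⟩
    by_cases h1 : tr.1 = hh
    · rw [if_neg (by simpa using h1)] at hb
      simp only [Bool.or_eq_true, decide_eq_true_eq] at hb
      exact ⟨tr, htr, h1, hb⟩
    · rw [if_pos (by simpa using h1)] at hb
      cases hb
  · rintro ⟨tr, htr, h1, h2⟩
    refine ⟨tr, htr, ?_⟩
    rw [if_neg (by simpa using h1)]
    simpa using h2

-- membership in the flattened candidate list
theorem mem_flatT (ts : List (Int × Int × Int)) (p : Int × Int) :
    p ∈ flatT ts ↔ ∃ tr ∈ ts, p = (tr.1, tr.2.1) ∨ p = (tr.1, tr.2.2) := by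
  simp [flatT]

-- the two digit characters of f"{n:02d}" for 0 ≤ n < 100 (finite check)
theorem fmt02_toList_nat : ∀ n : Nat, n < 100 →
    (fmt02 (n : Int)).toList = [Char.ofNat (48 + n / 10), Char.ofNat (48 + n % 10)] := by decide

theorem digit_lt : ∀ x : Nat, x < 10 → ∀ y : Nat, y < 10 →
    ((Char.ofNat (48 + x) < Char.ofNat (48 + y)) ↔ x < y) := by decide

theorem digit_eq : ∀ x : Nat, x < 10 → ∀ y : Nat, y < 10 →
    ((Char.ofNat (48 + x) = Char.ofNat (48 + y)) ↔ x = y) := by decide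

theorem fmt02_toList (n : Int) (h0 : 0 ≤ n) (h1 : n < 100) :
    (fmt02 n).toList = [Char.ofNat (48 + n.toNat / 10), Char.ofNat (48 + n.toNat % 10)] := by
  have h : n = (n.toNat : Int) := by omega
  conv_lhs => rw [h]
  rw [fmt02_toList_nat n.toNat (by omega)]

-- "HH:MM" strings compare lexicographically like the (hour, minute) pairs
theorem mono' (hx mx hy my : Int)
    (bhx : 0 ≤ hx ∧ hx < 100) (bmx : 0 ≤ mx ∧ mx < 100)
    (bhy : 0 ≤ hy ∧ hy < 100) (bmy : 0 ≤ my ∧ my < 100) :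
    (fmt02 hx ++ ":" ++ fmt02 mx < fmt02 hy ++ ":" ++ fmt02 my) ↔
      (hx < hy ∨ (hx = hy ∧ mx < my)) := by
  rw [String.lt_iff_toList_lt]
  simp only [String.toList_append, fmt02_toList hx bhx.1 bhx.2, fmt02_toList mx bmx.1 bmx.2,
    fmt02_toList hy bhy.1 bhy.2, fmt02_toList my bmy.1 bmy.2]
  show ([_, _, ':', _, _] : List Char) < [_, _, ':', _, _] ↔ _
  simp only [List.cons_lt_cons_iff]
  rw [digit_lt (hx.toNat / 10) (by omega) (hy.toNat / 10) (by omega),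
    digit_eq (hx.toNat / 10) (by omega) (hy.toNat / 10) (by omega),
    digit_lt (hx.toNat % 10) (by omega) (hy.toNat % 10) (by omega),
    digit_eq (hx.toNat % 10) (by omega) (hy.toNat % 10) (by omega),
    digit_lt (mx.toNat / 10) (by omega) (my.toNat / 10) (by omega),
    digit_eq (mx.toNat / 10) (by omega) (my.toNat / 10) (by omega),
    digit_lt (mx.toNat % 10) (by omega) (my.toNat % 10) (by omega),
    digit_eq (mx.toNat % 10) (by omega) (my.toNat % 10) (by omega)]
  have hcolon : ¬ ((':' : Char) < ':') := by decide
  have hnil : ¬ (([] : List Char) < []) := by decide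
  simp only [hcolon, hnil, false_or, and_false, or_false, true_and]
  omega

-- floor-division decomposition of a minute count by 60
theorem decomp (x : Int) :
    x = PySem.Int.floordiv x 60 * 60 + PySem.Int.mod x 60 ∧
      0 ≤ PySem.Int.mod x 60 ∧ PySem.Int.mod x 60 < 60 := by
  simp only [PySem.Int.floordiv, PySem.Int.mod, Int.fdiv_eq_ediv, Int.fmod_eq_emod]
  omega

theorem mono (x y : Int) (hx0 : 0 ≤ x) (hx1 : x < 1440) (hy0 : 0 ≤ y) (hy1 : y < 1440) :
    (fmtB x < fmtB y ↔ x < y) := by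
  obtain ⟨ex, exm0, exm1⟩ := decomp x
  obtain ⟨ey, eym0, eym1⟩ := decomp y
  unfold fmtB
  rw [mono' _ _ _ _ (by omega) (by omega) (by omega) (by omega)]
  omega

theorem cur_eq (p : Int × Int) (h : 0 ≤ p.1 ∧ p.1 < 24 ∧ 0 ≤ p.2 ∧ p.2 < 60) :
    fmt02 p.1 ++ ":" ++ fmt02 p.2 = fmtB (p.1 * 60 + p.2) := by
  have hd : PySem.Int.floordiv (p.1 * 60 + p.2) 60 = p.1 := by
    simp only [PySem.Int.floordiv, Int.fdiv_eq_ediv]; omega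
  have hm : PySem.Int.mod (p.1 * 60 + p.2) 60 = p.2 := by
    simp only [PySem.Int.mod, Int.fmod_eq_emod]; omega
  rw [fmtB, hd, hm]

theorem oneStep (x : Int) (p : Int × Int) (h0 : 0 ≤ x) (h1 : x < 1440) :
    stepS (fmtB x) p = fmtB (stepI x p) ∧ 0 ≤ stepI x p ∧ stepI x p < 1440 := by
  unfold stepS stepI
  by_cases hc : 0 ≤ p.1 ∧ p.1 < 24 ∧ 0 ≤ p.2 ∧ p.2 < 60
  · simp only [if_pos hc, cur_eq p hc]
    have hv0 : 0 ≤ p.1 * 60 + p.2 := by omega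
    have hv1 : p.1 * 60 + p.2 < 1440 := by omega
    by_cases hlt : x < p.1 * 60 + p.2
    · rw [if_pos ((mono x _ h0 h1 hv0 hv1).mpr hlt)]
      refine ⟨by rw [max_eq_right (le_of_lt hlt)], by omega, by omega⟩
    · rw [if_neg (by rw [mono x _ h0 h1 hv0 hv1]; exact hlt)]
      refine ⟨by rw [max_eq_left (by omega)], by omega, by omega⟩
  · simp only [if_neg hc]
    exact ⟨by trivial, h0, h1⟩

theorem Linv (ps : List (Int × Int)) (x : Int) (h0 : 0 ≤ x) (h1 : x < 1440) :
    ps.foldl stepS (fmtB x) = fmtB (ps.foldl stepI x) ∧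
      0 ≤ ps.foldl stepI x ∧ ps.foldl stepI x < 1440 := by
  induction ps generalizing x with
  | nil => exact ⟨rfl, h0, h1⟩
  | cons p ps ih =>
    obtain ⟨e, b0, b1⟩ := oneStep x p h0 h1
    simpa [List.foldl, e] using ih (stepI x p) b0 b1

-- the fold result only grows
theorem foldI_le (ps : List (Int × Int)) (x : Int) : x ≤ ps.foldl stepI x := by
  induction ps generalizing x with
  | nil => exact le_refl x
  | cons p ps ih =>
    refine le_trans ?_ (ih (stepI x p))
    unfold stepI; split_ifs <;> simp

-- every valid candidate is ≤ the fold result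
theorem foldI_ub (ps : List (Int × Int)) (x : Int) (p : Int × Int) (hp : p ∈ ps)
    (hv : 0 ≤ p.1 ∧ p.1 < 24 ∧ 0 ≤ p.2 ∧ p.2 < 60) :
    p.1 * 60 + p.2 ≤ ps.foldl stepI x := by
  induction ps generalizing x with
  | nil => cases hp
  | cons q ps ih =>
    rcases List.mem_cons.mp hp with h | h
    · subst h
      refine le_trans ?_ (foldI_le ps (stepI x p))
      unfold stepI; rw [if_pos hv]; exact le_max_right _ _
    · exact ih (stepI x q) h

-- the fold result is the start value or a valid candidate's value
theorem foldI_attain (ps : List (Int × Int)) (x : Int) :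
    ps.foldl stepI x = x ∨ ∃ p ∈ ps, (0 ≤ p.1 ∧ p.1 < 24 ∧ 0 ≤ p.2 ∧ p.2 < 60) ∧
      p.1 * 60 + p.2 = ps.foldl stepI x := by
  induction ps generalizing x with
  | nil => exact Or.inl rfl
  | cons q ps ih =>
    rcases ih (stepI x q) with h | ⟨p, hp, hv, he⟩
    · simp only [List.foldl_cons, h]
      unfold stepI
      split_ifs with hc
      · rcases max_choice x (q.1 * 60 + q.2) with h2 | h2
        · exact Or.inl h2
        · exact Or.inr ⟨q, List.mem_cons_self, hc, h2.symm⟩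
      · exact Or.inl rfl
    · exact Or.inr ⟨p, List.mem_cons_of_mem _ hp, hv, he⟩

-- the countdown scan returns fmtB M when nothing above M is formable and M is formable (or 0)
theorem scan_eq (F : Int → Int → Bool) (M : Int) (hM0 : 0 ≤ M) :
    ∀ n : Nat, M < n →
      (∀ t : Int, M < t → t < n → F (PySem.Int.floordiv t 60) (PySem.Int.mod t 60) = false) →
      (F (PySem.Int.floordiv M 60) (PySem.Int.mod M 60) = true ∨ M = 0) →
      scanB F (PySem.List.pyRange ((n : Int) - 1) (-1) (-1)) = fmtB M := by
  intro n
  induction n with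
  | zero => intro h; omega
  | succ n ih =>
    intro hlt habove hform
    have hcons : PySem.List.pyRange ((n + 1 : Nat) - 1) (-1) (-1) =
        ((n + 1 : Nat) - 1 : Int) :: PySem.List.pyRange ((n + 1 : Nat) - 1 - 1) (-1) (-1) :=
      PySem.List.pyRange_neg_one_cons (by push_cast; omega)
    rw [hcons]
    show (if F _ _ then _ else _) = _
    by_cases hM : M = ((n + 1 : Nat) - 1 : Int)
    · rcases hform with hf | h0
      · rw [← hM, if_pos hf, fmtB]
      · have hn : (n : Int) = 0 := by omega
        by_cases hf : F (PySem.Int.floordiv M 60) (PySem.Int.mod M 60) = true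
        · rw [← hM, if_pos hf, fmtB]
        · rw [← hM, if_neg hf]
          have : PySem.List.pyRange (M - 1) (-1) (-1) = [] :=
            PySem.List.pyRange_neg_one_eq_nil (by omega)
          rw [this]
          show "00:00" = fmtB M
          rw [h0]; decide
    · have hMlt : M < ((n + 1 : Nat) - 1 : Int) := by push_cast at hM hlt ⊢; omega
      rw [if_neg ?_]
      · have hre : ((n + 1 : Nat) - 1 - 1 : Int) = ((n : Int) - 1) := by push_cast; omega
        rw [hre]
        exact ih (by exact_mod_cast hMlt |>.trans_le (by push_cast; omega))
          (fun t ht1 ht2 => habove t ht1 (by push_cast at ht2 ⊢; omega)) hform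
      · simp only [habove _ hMlt (by push_cast; omega), Bool.false_eq_true, not_false_eq_true]

-- ===== VERDICT (by name: the statement is the Claim_ definition above) =====
theorem latest_clock_spec : Claim_equal_latest_clock := by
  intro a b c d _
  unfold Spec_latest_clock
  set pairs := flatT (trips a b c d) with hpairs
  set M := pairs.foldl stepI 0 with hM
  have h00 : ("00:00" : String) = fmtB 0 := by decide
  obtain ⟨e, b0, b1⟩ := Linv pairs 0 le_rfl (by norm_num)
  rw [A_eq, h00, e, ← hM]
  -- B's side
  have hform : ∀ t : Int, 0 ≤ t → t < 1440 →
      (formable a b c d (PySem.Int.floordiv t 60) (PySem.Int.mod t 60) = true ↔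
        ∃ p ∈ pairs, p.1 = PySem.Int.floordiv t 60 ∧ p.2 = PySem.Int.mod t 60) := by
    intro t _ _
    rw [formable_iff]
    constructor
    · rintro ⟨tr, htr, h1, h2⟩
      rcases h2 with h2 | h2
      · exact ⟨(tr.1, tr.2.1), (mem_flatT _ _).mpr ⟨tr, htr, Or.inl rfl⟩, h1, h2⟩
      · exact ⟨(tr.1, tr.2.2), (mem_flatT _ _).mpr ⟨tr, htr, Or.inr rfl⟩, h1, h2⟩
    · rintro ⟨p, hp, h1, h2⟩
      rcases (mem_flatT _ _).mp hp with ⟨tr, htr, hor⟩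
      rcases hor with he | he <;> rw [he] at h1 h2
      · exact ⟨tr, htr, h1, Or.inl h2⟩
      · exact ⟨tr, htr, h1, Or.inr h2⟩
  unfold latest_clock_alt
  have h1439 : (1439 : Int) = ((1440 : Nat) : Int) - 1 := by norm_num
  rw [h1439]
  symm
  apply scan_eq (formable a b c d) M b0 1440 (by exact_mod_cast b1)
  · -- nothing strictly above M is formable
    intro t ht1 ht2
    have ht2' : t < 1440 := by exact_mod_cast ht2
    have ht0 : 0 ≤ t := by omega
    by_contra hne
    rw [Bool.not_eq_false, hform t ht0 ht2'] at hne
    obtain ⟨p, hp, e1, e2⟩ := hne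
    obtain ⟨dec1, dec2, dec3⟩ := decomp t
    have hv : 0 ≤ p.1 ∧ p.1 < 24 ∧ 0 ≤ p.2 ∧ p.2 < 60 := by
      constructor
      · rw [e1]; omega
      refine ⟨?_, ?_, ?_⟩ <;> [rw [e1]; rw [e2]; rw [e2]] <;> omega
    have := foldI_ub pairs 0 p hp hv
    rw [e1, e2] at this
    omega
  · -- M itself is formable, or M = 0
    rcases foldI_attain pairs 0 with h | ⟨p, hp, hv, he⟩
    · exact Or.inr (by rw [← hM] at h; exact h)
    · rw [← hM] at he
      left
      rw [hform M b0 b1]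
      refine ⟨p, hp, ?_, ?_⟩
      · rw [← he]
        simp only [PySem.Int.floordiv, Int.fdiv_eq_ediv]; omega
      · rw [← he]
        simp only [PySem.Int.mod, Int.fmod_eq_emod]; omega
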